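-- pv_equiv track=rewrite | github.com/WonHwang/1D1P_2 | B7490.py | build
-- ===== SOURCE A (Python) =====
-- from collections import deque
--
-- ops = [" ", "+", "-"]
--
-- def calculate(exp):
--
--     queue = deque(list(exp))
--     stack = []
--     digit = ""
--     while queue:
--         d = queue.popleft()
--         if d in ops:
--             if len(stack) > 1:
--                 op = stack.pop()
--                 num = stack.pop()
--                 if op == "+":
--                     num += int(digit)
--                 elif op == "-":
--                     num -= int(digit)
--                 stack.append(num)
--                 digit = ""
--             else:
--                 stack.append(int(digit))
--                 digit = ""
--             stack.append(d)
--         else: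
--             digit += d
--
--     if digit:
--         if stack:
--             op = stack.pop()
--             num = stack.pop()
--             if op == "+":
--                 num += int(digit)
--             elif op == "-":
--                 num -= int(digit)
--             stack.append(num)
--             digit = ""
--         else:
--             stack.append(int(digit))
--             digit = ""
--
--     return stack.pop()
--
-- def build(N, select):
--
--     exp = ""
--     for i in range(N-1):
--         exp += str(i+1)
--         if select[i] == " ":
--             continue
--         exp += select[i]
--
--     exp += str(N)
--     res = calculate(exp)
--
--     return res
-- ===== SOURCE B (Python) =====
-- def build(N, select):
--     # Fold the numbers 1..N directly as integers: keep a running total,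
--     # the pending sign of the current term, and the current (possibly
--     # digit-glued) term value.  No expression string, no parser.
--     total = 0
--     sign = 1
--     cur = 1
--     for i in range(N - 1):
--         nxt = i + 2
--         s = select[i]
--         if s == " ":
--             cur = cur * 10 ** len(str(nxt)) + nxt
--         else:
--             total += sign * cur
--             sign = 1 if s == "+" else -1
--             cur = nxt
--     return total + sign * cur
-- ===== Notes on version B (the rewrite author's own statement) =====
-- stated objective: faster
-- what changed: B drops the expression string and the char-by-char deque/stack parser entirely: it folds the numbers 1..N as integers in one pass, keeping a running total, the pending sign and the current glued term (glue = cur*10**len(str(next))+next).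
-- outside the precondition, e.g. on build(0, []): A returns 0, B returns 1; on build(2, ['']): A returns 12, B returns -1; on build(2, ['5']): A returns 152, B returns -1
import Mathlib
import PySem

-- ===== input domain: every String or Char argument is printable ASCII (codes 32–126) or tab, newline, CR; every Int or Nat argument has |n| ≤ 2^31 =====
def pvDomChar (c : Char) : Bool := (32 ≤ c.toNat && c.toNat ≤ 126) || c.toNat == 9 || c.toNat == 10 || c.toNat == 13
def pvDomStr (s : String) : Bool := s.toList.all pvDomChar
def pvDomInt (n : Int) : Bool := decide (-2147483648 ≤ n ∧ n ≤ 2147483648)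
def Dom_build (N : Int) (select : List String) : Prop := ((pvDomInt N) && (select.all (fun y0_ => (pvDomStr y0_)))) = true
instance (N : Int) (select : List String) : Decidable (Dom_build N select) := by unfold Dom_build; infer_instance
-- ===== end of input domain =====

-- B replaces A's expression string + char-by-char stack parser by one integer fold
-- over the numbers 1..N (running total, pending sign, current glued term).

-- ===== PORT A =====
-- value of one ASCII digit char, and of a digit string; together they are a hand
-- port of Python's int() restricted to the nonempty all-digit strings that are the
-- only strings A ever passes to int() under Pre_build (exact there; none = ValueError)
def pvDigitVal (c : Char) : Int := (c.toNat : Int) - 48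
def pvDigitsVal (cs : List Char) : Int := cs.foldl (fun a c => 10 * a + pvDigitVal c) 0
def pvIntDigits? (cs : List Char) : Option Int :=
  if cs ≠ [] ∧ cs.all Char.isDigit then some (pvDigitsVal cs) else none

-- the stack of A's calculate holds ints and (one-char) operator strings
inductive CalcElem
  | num : Int → CalcElem
  | op : Char → CalcElem
deriving DecidableEq, Repr

-- the shared pop-pop-combine block (op = stack.pop(); num = stack.pop(); …; append).
-- The fallback branch is unreachable: in every run the stack here is [op, num]
-- (Python would raise TypeError on other shapes).
def calcCombine (stack : List CalcElem) (digit : List Char) : List CalcElem :=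
  match stack with
  | CalcElem.op o :: CalcElem.num n :: rest =>
      (if o = '+' then CalcElem.num (n + (pvIntDigits? digit).getD 0)
       else if o = '-' then CalcElem.num (n - (pvIntDigits? digit).getD 0)
       else CalcElem.num n) :: rest
  | _ => stack

-- one iteration of calculate's while loop (d popped from the queue); state (stack, digit)
def calcStep (st : List CalcElem × List Char) (d : Char) : List CalcElem × List Char :=
  match st with
  | (stack, digit) =>
    if d = ' ' ∨ d = '+' ∨ d = '-' then
      if 1 < stack.length then (CalcElem.op d :: calcCombine stack digit, [])
      else (CalcElem.op d :: CalcElem.num ((pvIntDigits? digit).getD 0) :: stack, [])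
    else (stack, digit ++ [d])

-- the trailing `if digit:` block
def calcFinish (st : List CalcElem × List Char) : List CalcElem :=
  match st with
  | (stack, digit) =>
    if digit ≠ [] then
      if stack ≠ [] then calcCombine stack digit
      else [CalcElem.num ((pvIntDigits? digit).getD 0)]
    else stack

-- return stack.pop() (fallback unreachable: Python would raise IndexError/return a str)
def calcPop (stack : List CalcElem) : Int :=
  match stack with
  | CalcElem.num n :: _ => n
  | _ => 0

def calculate (exp : List Char) : Int :=
  calcPop (calcFinish (List.foldl calcStep ([], []) exp))

-- the body of build's for-loop: exp += str(i+1); if select[i] != " ": exp += select[i]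
def pvStepExp (select : List String) (e : List Char) (i : Int) : List Char :=
  let e := e ++ PySem.Int.toChars (i + 1)
  let s := PySem.List.pyGetD select i ""   -- select[i]; out of range = IndexError, excluded by Pre_
  if s = " " then e else e ++ s.toList

def build (N : Int) (select : List String) : Int :=
  let exp := (PySem.List.pyRange 0 (N - 1) 1).foldl (pvStepExp select) []
  calculate (exp ++ PySem.Int.toChars N)

-- ===== PORT B =====
-- the body of B's for-loop over state (total, sign, cur)
def pvStepB (select : List String) (st : Int × Int × Int) (i : Int) : Int × Int × Int :=
  let nxt := i + 2
  let s := PySem.List.pyGetD select i ""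
  if s = " " then
    (st.1, st.2.1, st.2.2 * 10 ^ (PySem.Str.len (PySem.Int.toStr nxt)).toNat + nxt)
  else
    (st.1 + st.2.1 * st.2.2, if s = "+" then 1 else -1, nxt)

def build_alt (N : Int) (select : List String) : Int :=
  let st := (PySem.List.pyRange 0 (N - 1) 1).foldl (pvStepB select) (0, 1, 1)
  st.1 + st.2.1 * st.2.2

-- ===== PRECONDITION & SPEC =====
-- Pre_build keeps the task's natural domain: N ≥ 1 (for N ≤ 0 the 1..N expression is
-- degenerate: A returns 0 at N = 0 and raises ValueError for negative N), select long
-- enough (else A raises IndexError), and the used selections are the three operator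
-- strings " ", "+", "-" (other strings make A raise ValueError, or — for digit or
-- empty strings — accidentally splice extra digits into the expression).
def Pre_build (N : Int) (select : List String) : Prop :=
  1 ≤ N ∧ N - 1 ≤ (select.length : Int) ∧
    ∀ j : Nat, j < (N - 1).toNat →
      (select.getD j "" = " " ∨ select.getD j "" = "+" ∨ select.getD j "" = "-")
instance (N : Int) (select : List String) : Decidable (Pre_build N select) := by
  unfold Pre_build; infer_instance

def pvWitness_build : Int × List String := (4, [" ", "+", "-"])

def Spec_build (N : Int) (select : List String) (out : Int) : Prop := out = build_alt N select
instance (N : Int) (select : List String) (out : Int) : Decidable (Spec_build N select out) := by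
  unfold Spec_build; infer_instance

-- ===== CLAIM (what is proved, stated in full; the proofs are below) =====
def Claim_equal_build : Prop := ∀ (N : Int) (select : List String),
  Dom_build N select → Pre_build N select → Spec_build N select (build N select)

-- ===== LEMMAS AND PROOFS =====

-- decimal-digit facts about Nat.toDigits
lemma pv_core_eq : ∀ (n f : Nat) (acc : List Char), n < f →
    Nat.toDigitsCore 10 f n acc = Nat.toDigitsCore 10 (n + 1) n [] ++ acc := by
  intro n
  induction n using Nat.strong_induction_on with
  | _ n ih =>
    intro f acc hf
    obtain ⟨f, rfl⟩ : ∃ g, f = g + 1 := ⟨f - 1, by omega⟩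
    rw [Nat.toDigitsCore]
    conv_rhs => rw [Nat.toDigitsCore]
    by_cases h0 : n / 10 = 0
    · simp [h0]
    · have hlt : n / 10 < n := Nat.div_lt_self (by omega) (by omega)
      simp only [h0, ite_false]
      rw [ih (n / 10) hlt (f) _ (by omega), ih (n / 10) hlt n _ (by omega)]
      simp

lemma pv_toDigits10 (n : Nat) :
    Nat.toDigits 10 n =
      if n < 10 then [Nat.digitChar n]
      else Nat.toDigits 10 (n / 10) ++ [Nat.digitChar (n % 10)] := by
  unfold Nat.toDigits
  rw [Nat.toDigitsCore]
  by_cases h : n < 10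
  · have h0 : n / 10 = 0 := Nat.div_eq_of_lt h
    simp [h0, h, Nat.mod_eq_of_lt h]
  · have h0 : ¬ n / 10 = 0 := by omega
    have hlt : n / 10 < n := Nat.div_lt_self (by omega) (by omega)
    simp only [h0, ite_false, h]
    rw [pv_core_eq (n / 10) n _ (by omega)]

lemma pv_digitChar_ok (k : Nat) (h : k < 10) :
    (Nat.digitChar k).isDigit = true ∧ pvDigitVal (Nat.digitChar k) = (k : Int) := by
  interval_cases k <;> exact ⟨by decide, by decide⟩

lemma pv_val_acc (ds : List Char) : ∀ a : Int,
    ds.foldl (fun a c => 10 * a + pvDigitVal c) a = a * 10 ^ ds.length + pvDigitsVal ds := by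
  induction ds with
  | nil => intro a; simp [pvDigitsVal]
  | cons c ds ih =>
    intro a
    have h1 := ih (10 * a + pvDigitVal c)
    have h2 := ih (10 * 0 + pvDigitVal c)
    simp only [List.foldl_cons, pvDigitsVal] at *
    rw [h1, h2]
    simp only [List.length_cons, pow_succ]
    ring

lemma pv_val_append (xs ys : List Char) :
    pvDigitsVal (xs ++ ys) = pvDigitsVal xs * 10 ^ ys.length + pvDigitsVal ys := by
  simp only [pvDigitsVal, List.foldl_append]
  rw [pv_val_acc]
  rfl

lemma pv_digits_ok (k : Nat) :
    Nat.toDigits 10 k ≠ [] ∧ (∀ c ∈ Nat.toDigits 10 k, c.isDigit = true) ∧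
      pvDigitsVal (Nat.toDigits 10 k) = (k : Int) := by
  induction k using Nat.strong_induction_on with
  | _ k ih =>
    rw [pv_toDigits10]
    by_cases h : k < 10
    · simp only [h, ite_true]
      obtain ⟨hd, hv⟩ := pv_digitChar_ok k h
      refine ⟨by simp, by simpa using hd, ?_⟩
      simp [pvDigitsVal, hv]
    · have hlt : k / 10 < k := Nat.div_lt_self (by omega) (by omega)
      obtain ⟨hne, hdig, hval⟩ := ih (k / 10) hlt
      obtain ⟨hd, hv⟩ := pv_digitChar_ok (k % 10) (Nat.mod_lt _ (by omega))
      simp only [h, ite_false]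
      refine ⟨by simp, ?_, ?_⟩
      · intro c hc
        rcases List.mem_append.1 hc with hc | hc
        · exact hdig c hc
        · simp at hc; subst hc; exact hd
      · rw [pv_val_append, hval]
        simp only [List.length_singleton, pow_one, pvDigitsVal, List.foldl_cons, List.foldl_nil]
        rw [hv]
        have := Nat.div_add_mod k 10
        push_cast
        omega

lemma pv_toChars_natCast (k : Nat) : PySem.Int.toChars (k : Int) = Nat.toDigits 10 k := by
  simp [PySem.Int.toChars, Int.not_lt.2 (Int.natCast_nonneg k)]

-- digits pass through calcStep by only growing `digit`
lemma pv_digit_run : ∀ (ds : List Char) (st : List CalcElem × List Char),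
    (∀ c ∈ ds, c.isDigit = true) →
    List.foldl calcStep st ds = (st.1, st.2 ++ ds) := by
  intro ds
  induction ds with
  | nil => intro st h; simp
  | cons c ds ih =>
    intro st h
    obtain ⟨stack, digit⟩ := st
    have hc : c.isDigit = true := h c (by simp)
    have hop : ¬ (c = ' ' ∨ c = '+' ∨ c = '-') := by
      rintro (rfl | rfl | rfl) <;> simp at hc
    simp only [List.foldl_cons, calcStep, hop, ite_false]
    rw [ih _ (fun x hx => h x (by simp [hx]))]
    simp

-- invariants of the simulation
def StackInv (stack : List CalcElem) (total sign : Int) : Prop :=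
  (stack = [] ∧ total = 0 ∧ sign = 1) ∨
  (stack = [CalcElem.op '+', CalcElem.num total] ∧ sign = 1) ∨
  (stack = [CalcElem.op '-', CalcElem.num total] ∧ sign = -1)

def DigitInv (digit : List Char) (cur : Int) : Prop :=
  digit ≠ [] ∧ (∀ c ∈ digit, c.isDigit = true) ∧ pvDigitsVal digit = cur

-- the characters contributed to exp by loop index j, and B's loop body
def pvOpPart (select : List String) (j : Nat) : List Char :=
  if PySem.List.pyGetD select (j : Int) "" = " " then []
  else (PySem.List.pyGetD select (j : Int) "").toList

def pvChunk (select : List String) (j : Nat) : List Char :=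
  pvOpPart select j ++ PySem.Int.toChars ((j : Int) + 2)

lemma pv_intDigits_of_inv {digit : List Char} {cur : Int} (h : DigitInv digit cur) :
    (pvIntDigits? digit).getD 0 = cur := by
  obtain ⟨hne, hdig, hval⟩ := h
  unfold pvIntDigits?
  rw [if_pos ⟨hne, List.all_eq_true.2 hdig⟩]
  simpa using hval

lemma pv_sim (select : List String) : ∀ (js : List Nat) (total sign cur : Int)
    (stack : List CalcElem) (digit : List Char),
    (∀ j ∈ js, PySem.List.pyGetD select (j : Int) "" = " " ∨
        PySem.List.pyGetD select (j : Int) "" = "+" ∨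
        PySem.List.pyGetD select (j : Int) "" = "-") →
    StackInv stack total sign → DigitInv digit cur →
    calcPop (calcFinish (List.foldl calcStep (stack, digit) (js.flatMap (pvChunk select)))) =
      (js.foldl (fun st (j : Nat) => pvStepB select st (j : Int)) (total, sign, cur)).1 +
        (js.foldl (fun st (j : Nat) => pvStepB select st (j : Int)) (total, sign, cur)).2.1 *
          (js.foldl (fun st (j : Nat) => pvStepB select st (j : Int)) (total, sign, cur)).2.2 := by
  intro js
  induction js with
  | nil =>
    intro total sign cur stack digit _ hst hdg
    obtain ⟨hne, hdig, hval⟩ := hdg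
    have hgd : (pvIntDigits? digit).getD 0 = cur := pv_intDigits_of_inv ⟨hne, hdig, hval⟩
    simp only [List.flatMap_nil, List.foldl_nil]
    rcases hst with ⟨rfl, rfl, rfl⟩ | ⟨rfl, rfl⟩ | ⟨rfl, rfl⟩
    · simp [calcFinish, calcPop, hne, hgd]
    · simp [calcFinish, calcCombine, calcPop, hne, hgd]
    · simp [calcFinish, calcCombine, calcPop, hne, hgd]
      ring
  | cons j js ih =>
    intro total sign cur stack digit hsel hst hdg
    obtain ⟨hne, hdig, hval⟩ := hdg
    have hgd : (pvIntDigits? digit).getD 0 = cur := pv_intDigits_of_inv ⟨hne, hdig, hval⟩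
    have hrest : ∀ x ∈ js, PySem.List.pyGetD select (x : Int) "" = " " ∨
        PySem.List.pyGetD select (x : Int) "" = "+" ∨
        PySem.List.pyGetD select (x : Int) "" = "-" :=
      fun x hx => hsel x (by simp [hx])
    have hcast : ((j : Int) + 2) = ((j + 2 : Nat) : Int) := by push_cast; ring
    have hchars : PySem.Int.toChars ((j : Int) + 2) = Nat.toDigits 10 (j + 2) := by
      rw [hcast, pv_toChars_natCast]
    obtain ⟨hne2, hdig2, hval2⟩ := pv_digits_ok (j + 2)
    have hval2' : pvDigitsVal (Nat.toDigits 10 (j + 2)) = (j : Int) + 2 := by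
      rw [hval2]; push_cast; ring
    have hlen : (PySem.Str.len (PySem.Int.toStr ((j : Int) + 2))).toNat
        = (Nat.toDigits 10 (j + 2)).length := by
      rw [PySem.Str.len_eq, PySem.Int.toList_toStr, hchars]; simp
    simp only [List.flatMap_cons, List.foldl_append, List.foldl_cons]
    rcases hsel j (by simp) with hs | hs | hs
    · -- glue: select[j] == " "
      simp only [pvChunk, pvOpPart, if_pos hs, List.nil_append]
      rw [hchars, pv_digit_run _ _ hdig2,
        show pvStepB select (total, sign, cur) (j : Int)
            = (total, sign, cur * 10 ^ (Nat.toDigits 10 (j + 2)).length + ((j : Int) + 2)) from by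
          simp only [pvStepB, if_pos hs]
          rw [hlen]]
      exact ih total sign _ stack (digit ++ Nat.toDigits 10 (j + 2)) hrest hst
        ⟨by simp [hne], fun c hc => by
            rcases List.mem_append.1 hc with h | h
            exacts [hdig c h, hdig2 c h],
          by rw [pv_val_append, hval, hval2']⟩
    · -- select[j] == "+"
      have hts : (PySem.List.pyGetD select (j : Int) "").toList = ['+'] := by rw [hs]; decide
      have hnsp : ¬ PySem.List.pyGetD select (j : Int) "" = " " := by rw [hs]; decide
      simp only [pvChunk, pvOpPart, if_neg hnsp, hts, List.cons_append, List.nil_append,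
        List.foldl_cons]
      rcases hst with ⟨rfl, rfl, rfl⟩ | ⟨rfl, rfl⟩ | ⟨rfl, rfl⟩
      · rw [show calcStep (([] : List CalcElem), digit) '+'
              = ([CalcElem.op '+', CalcElem.num cur], []) from by simp [calcStep, hgd],
          show pvStepB select (0, 1, cur) (j : Int) = (cur, 1, (j : Int) + 2) from by
            simp [pvStepB, hs],
          hchars, pv_digit_run _ _ hdig2]
        exact ih cur 1 _ _ (Nat.toDigits 10 (j + 2)) hrest
          (Or.inr (Or.inl ⟨rfl, rfl⟩)) ⟨hne2, hdig2, hval2'⟩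
      · rw [show calcStep ([CalcElem.op '+', CalcElem.num total], digit) '+'
              = ([CalcElem.op '+', CalcElem.num (total + cur)], []) from by
            simp [calcStep, calcCombine, hgd],
          show pvStepB select (total, 1, cur) (j : Int) = (total + cur, 1, (j : Int) + 2) from by
            simp [pvStepB, hs],
          hchars, pv_digit_run _ _ hdig2]
        exact ih (total + cur) 1 _ _ (Nat.toDigits 10 (j + 2)) hrest
          (Or.inr (Or.inl ⟨rfl, rfl⟩)) ⟨hne2, hdig2, hval2'⟩
      · rw [show calcStep ([CalcElem.op '-', CalcElem.num total], digit) '+'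
              = ([CalcElem.op '+', CalcElem.num (total - cur)], []) from by
            simp [calcStep, calcCombine, hgd],
          show pvStepB select (total, -1, cur) (j : Int) = (total - cur, 1, (j : Int) + 2) from by
            simp [pvStepB, hs, Prod.ext_iff]; ring,
          hchars, pv_digit_run _ _ hdig2]
        exact ih (total - cur) 1 _ _ (Nat.toDigits 10 (j + 2)) hrest
          (Or.inr (Or.inl ⟨rfl, rfl⟩)) ⟨hne2, hdig2, hval2'⟩
    · -- select[j] == "-"
      have hts : (PySem.List.pyGetD select (j : Int) "").toList = ['-'] := by rw [hs]; decide
      have hnsp : ¬ PySem.List.pyGetD select (j : Int) "" = " " := by rw [hs]; decide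
      simp only [pvChunk, pvOpPart, if_neg hnsp, hts, List.cons_append, List.nil_append,
        List.foldl_cons]
      rcases hst with ⟨rfl, rfl, rfl⟩ | ⟨rfl, rfl⟩ | ⟨rfl, rfl⟩
      · rw [show calcStep (([] : List CalcElem), digit) '-'
              = ([CalcElem.op '-', CalcElem.num cur], []) from by simp [calcStep, hgd],
          show pvStepB select (0, 1, cur) (j : Int) = (cur, -1, (j : Int) + 2) from by
            simp [pvStepB, hs],
          hchars, pv_digit_run _ _ hdig2]
        exact ih cur (-1) _ _ (Nat.toDigits 10 (j + 2)) hrest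
          (Or.inr (Or.inr ⟨rfl, rfl⟩)) ⟨hne2, hdig2, hval2'⟩
      · rw [show calcStep ([CalcElem.op '+', CalcElem.num total], digit) '-'
              = ([CalcElem.op '-', CalcElem.num (total + cur)], []) from by
            simp [calcStep, calcCombine, hgd],
          show pvStepB select (total, 1, cur) (j : Int) = (total + cur, -1, (j : Int) + 2) from by
            simp [pvStepB, hs],
          hchars, pv_digit_run _ _ hdig2]
        exact ih (total + cur) (-1) _ _ (Nat.toDigits 10 (j + 2)) hrest
          (Or.inr (Or.inr ⟨rfl, rfl⟩)) ⟨hne2, hdig2, hval2'⟩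
      · rw [show calcStep ([CalcElem.op '-', CalcElem.num total], digit) '-'
              = ([CalcElem.op '-', CalcElem.num (total - cur)], []) from by
            simp [calcStep, calcCombine, hgd],
          show pvStepB select (total, -1, cur) (j : Int) = (total - cur, -1, (j : Int) + 2) from by
            simp [pvStepB, hs, Prod.ext_iff]; ring,
          hchars, pv_digit_run _ _ hdig2]
        exact ih (total - cur) (-1) _ _ (Nat.toDigits 10 (j + 2)) hrest
          (Or.inr (Or.inr ⟨rfl, rfl⟩)) ⟨hne2, hdig2, hval2'⟩

lemma pv_exp_decomp (select : List String) : ∀ n : Nat,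
    (List.range n).foldl (fun e (j : Nat) => pvStepExp select e (j : Int)) []
      ++ PySem.Int.toChars ((n : Int) + 1)
      = PySem.Int.toChars (1 : Int) ++ (List.range n).flatMap (pvChunk select) := by
  intro n
  induction n with
  | zero => simp
  | succ n ih =>
    have hc : ((n + 1 : Nat) : Int) + 1 = (n : Int) + 2 := by push_cast; ring
    have hstep : ∀ e, pvStepExp select e (n : Int)
        = (e ++ PySem.Int.toChars ((n : Int) + 1)) ++ pvOpPart select n := by
      intro e
      simp only [pvStepExp, pvOpPart]
      split_ifs <;> simp [List.append_assoc]
    rw [List.range_succ, List.foldl_append, List.flatMap_append]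
    simp only [List.foldl_cons, List.foldl_nil, List.flatMap_cons, List.flatMap_nil,
      List.append_nil, hc]
    rw [hstep,
      show pvChunk select n = pvOpPart select n ++ PySem.Int.toChars ((n : Int) + 2) from rfl,
      ih]
    simp [List.append_assoc]

-- ===== VERDICT (by name: the statement is the Claim_ definition above) =====
set_option maxRecDepth 4096 in
theorem build_spec : Claim_equal_build := by
  intro N select _ hpre
  obtain ⟨hN, hlen, hsel⟩ := hpre
  show build N select = build_alt N select
  set n := (N - 1).toNat
  have hN1 : N - 1 = (n : Int) := by omega
  have hN2 : N = (n : Int) + 1 := by omega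
  have hA : build N select = calculate
      ((List.range n).foldl (fun e (j : Nat) => pvStepExp select e (j : Int)) []
        ++ PySem.Int.toChars ((n : Int) + 1)) := by
    simp only [build]
    rw [hN1, hN2, PySem.List.pyRange_zero_natCast]
    simp only [List.foldl_map]
  have hB : build_alt N select =
      ((List.range n).foldl (fun st (j : Nat) => pvStepB select st (j : Int)) (0, 1, 1)).1 +
        ((List.range n).foldl (fun st (j : Nat) => pvStepB select st (j : Int)) (0, 1, 1)).2.1 *
          ((List.range n).foldl (fun st (j : Nat) => pvStepB select st (j : Int)) (0, 1, 1)).2.2 := by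
    simp only [build_alt]
    rw [hN1, PySem.List.pyRange_zero_natCast]
    simp only [List.foldl_map]
  rw [hA, hB, pv_exp_decomp]
  have hc1 : PySem.Int.toChars (1 : Int) = ['1'] := by
    rw [show (1 : Int) = ((1 : Nat) : Int) from by norm_num, pv_toChars_natCast, pv_toDigits10]
    norm_num
    decide
  show calcPop (calcFinish (List.foldl calcStep ([], [])
      (PySem.Int.toChars 1 ++ (List.range n).flatMap (pvChunk select)))) = _
  rw [List.foldl_append, hc1,
    show List.foldl calcStep ([], []) ['1'] = ([], ['1']) from by simp [calcStep]]
  exact pv_sim select (List.range n) 0 1 1 [] ['1']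
    (fun j hj => by
      rw [PySem.List.pyGetD_natCast]
      exact hsel j (by simpa using hj))
    (Or.inl ⟨rfl, rfl, rfl⟩)
    ⟨by simp, fun c hc => by simp only [List.mem_singleton] at hc; subst hc; rfl, by decide⟩
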